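-- pv_equiv track=rewrite | github.com/mikemykhaylov/google-foobar | l02c02.py | solution
-- ===== SOURCE A (Python) =====
-- def solution(total_lambs):
--     max_sum = total_lambs
--     max_hench = 0
--
--     while max_sum >= 2 ** max_hench:
--         max_sum -= 2 ** max_hench
--         max_hench += 1
--
--     min_sum = total_lambs
--     min_hench = 0
--     prev_prev_given = 0
--     prev_given = 0
--
--     while min_sum >= prev_prev_given + prev_given:
--         hench_pay = None
--         if min_hench == 0:
--             hench_pay = 1
--         else:
--             hench_pay = prev_prev_given + prev_given
--         min_sum -= hench_pay
--         prev_prev_given = prev_given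
--         prev_given = hench_pay
--         min_hench += 1
--
--     return min_hench - max_hench
-- ===== SOURCE B (Python) =====
-- def solution(total_lambs):
--     if total_lambs < 0:
--         return 0
--     # largest k with 2^k - 1 <= total_lambs, in closed form
--     max_hench = (total_lambs + 1).bit_length() - 1
--     # greedy Fibonacci payouts 1, 1, 2, 3, 5, ... counted by a single loop
--     remaining = total_lambs - 1
--     min_hench = 1
--     pp, pg = 0, 1
--     while remaining >= pp + pg:
--         pay = pp + pg
--         remaining -= pay
--         pp, pg = pg, pay
--         min_hench += 1
--     return min_hench - max_hench
-- ===== Notes on version B (the rewrite author's own statement) =====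
-- stated objective: alternative
-- what changed: The powers-of-two subtraction loop for max_hench is replaced by the closed form (total_lambs+1).bit_length()-1; the min side stays a single Fibonacci-payout loop started directly from the state after the first payment.
import Mathlib
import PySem

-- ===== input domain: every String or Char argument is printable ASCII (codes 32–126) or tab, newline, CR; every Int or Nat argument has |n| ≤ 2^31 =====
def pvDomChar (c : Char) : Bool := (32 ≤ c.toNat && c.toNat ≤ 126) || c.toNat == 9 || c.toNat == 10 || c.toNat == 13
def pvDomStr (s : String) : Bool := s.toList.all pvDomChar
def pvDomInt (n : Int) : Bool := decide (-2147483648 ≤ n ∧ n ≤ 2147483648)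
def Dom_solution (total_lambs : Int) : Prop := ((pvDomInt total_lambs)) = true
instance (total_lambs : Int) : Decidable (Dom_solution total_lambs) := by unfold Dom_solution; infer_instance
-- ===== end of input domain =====

-- B replaces A's powers-of-two loop by the closed form (total+1).bit_length()-1; same value proved for all inputs in Dom.

-- ===== PORT A =====
-- while max_sum >= 2 ** max_hench: …   (max_hench stays ≥ 0, so 2 ^ h.toNat is exact for Python's 2 ** max_hench;
-- fuel (total_lambs+2).toNat strictly exceeds the iteration count, so the loop always exits via its own condition)
def aMaxLoop : Nat → Int → Int → Int
  | 0, _, h => h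
  | f+1, s, h => if s ≥ 2 ^ h.toNat then aMaxLoop f (s - 2 ^ h.toNat) (h + 1) else h

-- while min_sum >= prev_prev_given + prev_given: …  with hench_pay = 1 on the first pass
def aMinLoop : Nat → Int → Int → Int → Int → Int
  | 0, _, h, _, _ => h
  | f+1, s, h, pp, pg =>
    if s ≥ pp + pg then
      let pay := if h = 0 then 1 else pp + pg
      aMinLoop f (s - pay) (h + 1) pg pay
    else h

def solution (total_lambs : Int) : Int :=
  aMinLoop (total_lambs + 2).toNat total_lambs 0 0 0
    - aMaxLoop (total_lambs + 2).toNat total_lambs 0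

-- ===== PORT B =====
-- B's Fibonacci loop, entered with the first payment of 1 already made
def bMinLoop : Nat → Int → Int → Int → Int → Int
  | 0, _, h, _, _ => h
  | f+1, s, h, pp, pg =>
    if s ≥ pp + pg then bMinLoop f (s - (pp + pg)) (h + 1) pg (pp + pg) else h

def solution_alt (total_lambs : Int) : Int :=
  if total_lambs < 0 then 0
  else
    ((bMinLoop (total_lambs + 1).toNat (total_lambs - 1) 1 0 1)
      - ((PySem.Int.bitLength (total_lambs + 1) : Int) - 1))

-- ===== PRECONDITION & SPEC =====
def Spec_solution (total_lambs : Int) (out : Int) : Prop := out = solution_alt total_lambs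
instance (total_lambs : Int) (out : Int) : Decidable (Spec_solution total_lambs out) := by unfold Spec_solution; infer_instance

-- ===== CLAIM (what is proved, stated in full; the proofs are below) =====
def Claim_equal_solution : Prop := ∀ (total_lambs : Int), Dom_solution total_lambs → Spec_solution total_lambs (solution total_lambs)

-- ===== LEMMAS AND PROOFS =====

lemma aMaxLoop_neg (f : Nat) (t : Int) (ht : t < 1) : aMaxLoop f t 0 = 0 := by
  cases f with
  | zero => rfl
  | succ f => simp [aMaxLoop]; omega

lemma aMinLoop_neg (f : Nat) (t : Int) (ht : t < 0) : aMinLoop f t 0 0 0 = 0 := by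
  cases f with
  | zero => rfl
  | succ f => simp [aMinLoop]; omega

lemma aMinLoop_eq_bMinLoop (f : Nat) : ∀ (s h pp pg : Int), 1 ≤ h →
    aMinLoop f s h pp pg = bMinLoop f s h pp pg := by
  induction f with
  | zero => intro s h pp pg _; rfl
  | succ f ih =>
    intro s h pp pg hh
    simp only [aMinLoop, bMinLoop]
    split
    · rw [if_neg (by omega : ¬ h = 0)]
      exact ih _ _ _ _ (by omega)
    · rfl

lemma aMaxLoop_bitLength (f : Nat) : ∀ (hn m : Nat), 2 ^ hn ≤ m → m < 2 ^ (f + hn) →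
    aMaxLoop f ((m : Int) - 2 ^ hn) (hn : Int) + 1 = (PySem.Int.bitLength (m : Int) : Int) := by
  induction f with
  | zero =>
    intro hn m h1 h2
    simp only [Nat.zero_add] at h2
    omega
  | succ f ih =>
    intro hn m h1 h2
    simp only [aMaxLoop, Int.toNat_natCast]
    have hcast : ((2 ^ hn : Nat) : Int) = (2 : Int) ^ hn := by push_cast; ring
    by_cases hc : 2 ^ (hn + 1) ≤ m
    · have hcN : 2 ^ hn + 2 ^ hn ≤ m := by rw [pow_succ] at hc; omega
      have hcI : ((2 ^ hn : Nat) : Int) + ((2 ^ hn : Nat) : Int) ≤ (m : Int) := by exact_mod_cast hcN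
      rw [hcast] at hcI
      rw [if_pos (by linarith)]
      have hstep : ((m : Int) - 2 ^ hn) - 2 ^ hn = ((m : Int)) - 2 ^ (hn + 1) := by
        rw [pow_succ]; ring
      rw [hstep]
      have hrec := ih (hn + 1) m hc (by rw [show f + (hn + 1) = f + 1 + hn by omega]; exact h2)
      rw [← hrec]
      norm_num
    · have hcN : m < 2 ^ hn + 2 ^ hn := by rw [pow_succ] at hc; omega
      have hcI : (m : Int) < ((2 ^ hn : Nat) : Int) + ((2 ^ hn : Nat) : Int) := by exact_mod_cast hcN
      rw [hcast] at hcI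
      rw [if_neg (by linarith)]
      -- loop exits: 2^hn ≤ m < 2^(hn+1), so bit_length m = hn + 1
      have hm0 : (m : Int) ≠ 0 := by
        have h01 : 1 ≤ 2 ^ hn := Nat.one_le_two_pow
        have : 0 < m := by omega
        exact_mod_cast this.ne'
      have hub := PySem.Int.lt_two_pow_bitLength (m : Int)
      have hlb := PySem.Int.two_pow_bitLength_le (m : Int) hm0
      rw [Int.natAbs_natCast] at hub hlb
      set L := PySem.Int.bitLength (m : Int) with hL
      have h1' : hn < L := by
        have : 2 ^ hn < 2 ^ L := lt_of_le_of_lt h1 hub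
        exact (Nat.pow_lt_pow_iff_right (by norm_num)).mp this
      have h2' : L - 1 < hn + 1 := by
        have : 2 ^ (L - 1) < 2 ^ (hn + 1) := lt_of_le_of_lt hlb (by rw [pow_succ]; omega)
        exact (Nat.pow_lt_pow_iff_right (by norm_num)).mp this
      have hLe : L = hn + 1 := by omega
      rw [hLe]; push_cast; ring

-- ===== VERDICT (by name: the statement is the Claim_ definition above) =====
theorem solution_spec : Claim_equal_solution := by
  intro t _
  unfold Spec_solution solution solution_alt
  by_cases ht : t < 0
  · rw [if_pos ht, aMaxLoop_neg _ _ (by omega), aMinLoop_neg _ _ ht]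
    norm_num
  · rw [if_neg ht]
    rw [Int.not_lt] at ht
    obtain ⟨n, rfl⟩ := Int.eq_ofNat_of_zero_le ht
    have hf2 : ((n : Int) + 2).toNat = n + 2 := by omega
    have hf1 : ((n : Int) + 1).toNat = n + 1 := by omega
    rw [hf2, hf1]
    -- min side: A's loop performs its first iteration (pay 1), landing in B's loop state
    have hmin : aMinLoop (n + 2) (n : Int) 0 0 0 = bMinLoop (n + 1) ((n : Int) - 1) 1 0 1 := by
      have h0 : aMinLoop (n + 2) (n : Int) 0 0 0 = aMinLoop (n + 1) ((n : Int) - 1) 1 0 1 := by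
        simp [aMinLoop]
      rw [h0, aMinLoop_eq_bMinLoop _ _ _ _ _ le_rfl]
    -- max side: the closed form via the loop characterisation, with m = n + 1
    have hmax : aMaxLoop (n + 2) (n : Int) 0 + 1 = (PySem.Int.bitLength ((n : Int) + 1) : Int) := by
      have hcast : ((n + 1 : Nat) : Int) - 2 ^ 0 = (n : Int) := by push_cast; ring
      have hbig : n + 1 < 2 ^ (n + 2 + 0) := by
        calc n + 1 < 2 ^ (n + 1) := Nat.lt_two_pow_self
          _ ≤ 2 ^ (n + 2 + 0) := Nat.pow_le_pow_right (by norm_num) (by omega)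
      have := aMaxLoop_bitLength (n + 2) 0 (n + 1) (by simp) hbig
      rw [hcast] at this
      simpa using this
    rw [hmin]
    omega
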